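-- pv_equiv track=rewrite | github.com/Teemperor/i-hate-latex-diff | i-hate-latex-diff.py | make_tokens
-- ===== SOURCE A (Python) =====
-- def make_tokens(lines):
--     """
--     Creates the latex tokens feed to the diff tool.
--     """
--
--     result = lines
--     split_on = [" "]
--
--     for splitter in split_on:
--         tmp_result = []
--         for tmp in result:
--             # Split by sep but preserve the sep. This way we can concatenate
--             # at the end and recreate the original input.
--             tokens = tmp.split(splitter)
--             for token in tokens[:-1]:
--                 tmp_result.append(token + splitter)
--             if tokens:
--                 tmp_result.append(tokens[-1])
--         result = tmp_result
--     return result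
-- ===== SOURCE B (Python) =====
-- def make_tokens(lines):
--     """
--     Creates the latex tokens feed to the diff tool.
--     Char-by-char scan: keep a buffer; on a space emit buffer+' ' and reset,
--     at end of each line emit the remaining buffer.
--     """
--     result = []
--     for line in lines:
--         buf = ""
--         for ch in line:
--             if ch == " ":
--                 result.append(buf + " ")
--                 buf = ""
--             else:
--                 buf += ch
--         result.append(buf)
--     return result
-- ===== Notes on version B (the rewrite author's own statement) =====
-- stated objective: alternative
-- what changed: Replaces split-then-reappend (str.split plus a slice loop re-attaching separators) with a single char-by-char state machine over each line that emits tokens directly from a buffer.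
import Mathlib
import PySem

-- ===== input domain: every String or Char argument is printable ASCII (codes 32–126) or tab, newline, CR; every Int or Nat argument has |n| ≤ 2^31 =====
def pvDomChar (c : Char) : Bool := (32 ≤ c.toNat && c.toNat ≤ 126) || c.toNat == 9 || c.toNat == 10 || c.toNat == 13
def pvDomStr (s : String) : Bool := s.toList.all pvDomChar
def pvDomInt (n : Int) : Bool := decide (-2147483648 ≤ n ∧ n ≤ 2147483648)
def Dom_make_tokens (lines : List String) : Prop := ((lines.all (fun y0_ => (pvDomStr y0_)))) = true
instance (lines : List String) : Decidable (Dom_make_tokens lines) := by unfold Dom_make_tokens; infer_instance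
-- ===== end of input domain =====

-- B replaces A's split-then-reappend with a per-line char-by-char buffer scan (alternative decomposition, same cost).

-- ===== PORT A =====
def make_tokens (lines : List String) : List String :=
  let result := lines
  let split_on := [" "]
  split_on.foldl
    (fun result splitter =>
      result.foldl
        (fun tmp_result tmp =>
          -- tmp.split(splitter): the splitter is the nonempty literal " ", so split never raises
          let tokens := (PySem.Chars.splitOn tmp.toList splitter.toList).map String.ofList
          let tmp_result :=
            (PySem.List.slice tokens none (some (-1))).foldl
              (fun acc token => acc ++ [token ++ splitter]) tmp_result
          if tokens.isEmpty then tmp_result else tmp_result ++ [tokens.getLast!])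
        [])
    result

-- ===== PORT B =====
def make_tokens_alt (lines : List String) : List String :=
  lines.foldl
    (fun result line =>
      let st := line.toList.foldl
        (fun (p : List String × String) ch =>
          if ch = ' ' then (p.1 ++ [p.2.push ' '], "") else (p.1, p.2.push ch))
        (result, "")
      st.1 ++ [st.2])
    []

-- ===== PRECONDITION & SPEC =====
def Spec_make_tokens (lines : List String) (out : List String) : Prop := out = make_tokens_alt lines
instance (lines : List String) (out : List String) : Decidable (Spec_make_tokens lines out) := by unfold Spec_make_tokens; infer_instance

-- ===== CLAIM (what is proved, stated in full; the proofs are below) =====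
def Claim_equal_make_tokens : Prop := ∀ (lines : List String), Dom_make_tokens lines → Spec_make_tokens lines (make_tokens lines)

-- ===== LEMMAS AND PROOFS =====

/-- A simple recursive characterisation of Python's split on a single space. -/
def split1 (b : List Char) : List Char → List (List Char)
  | [] => [b]
  | c :: cs => if c = ' ' then b :: split1 [] cs else split1 (b ++ [c]) cs

theorem split1_ne_nil (b : List Char) (cs : List Char) : split1 b cs ≠ [] := by
  induction cs generalizing b with
  | nil => simp [split1]
  | cons c cs ih => by_cases h : c = ' ' <;> simp [split1, h, ih]

theorem splitOn_go_eq (cs : List Char) : ∀ (fuel : Nat) (cur : List Char) (acc : List (List Char)),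
    cs.length < fuel →
    PySem.Chars.splitOn.go [' '] fuel cs cur acc = acc.reverse ++ split1 cur.reverse cs := by
  induction cs with
  | nil =>
    intro fuel cur acc h
    match fuel with
    | f + 1 => simp [PySem.Chars.splitOn.go, split1]
  | cons c cs ih =>
    intro fuel cur acc h
    match fuel with
    | f + 1 =>
      by_cases hc : c = ' '
      · subst hc
        have hpre : [' '].isPrefixOf (' ' :: cs) = true := by simp [List.isPrefixOf]
        have hdrop : List.drop [' '].length (' ' :: cs) = cs := rfl
        simp only [PySem.Chars.splitOn.go, hpre, if_pos, hdrop]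
        rw [ih f ([] : List Char) (cur.reverse :: acc) (by simpa using Nat.lt_of_succ_lt_succ h)]
        simp [split1]
      · have hpre : [' '].isPrefixOf (c :: cs) = false := by
          simp [List.isPrefixOf]
          exact fun hh => (hc hh.symm).elim
        simp only [PySem.Chars.splitOn.go, hpre, Bool.false_eq_true, if_false]
        rw [ih f (c :: cur) acc (by simpa using Nat.lt_of_succ_lt_succ h)]
        simp [split1, hc]

theorem splitOn_space (cs : List Char) : PySem.Chars.splitOn cs [' '] = split1 [] cs := by
  unfold PySem.Chars.splitOn
  rw [splitOn_go_eq cs (cs.length + 1) [] [] (Nat.lt_succ_self _)]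
  rfl

theorem slice_dropLast (xs : List String) : PySem.List.slice xs none (some (-1)) = xs.dropLast := by
  simp [PySem.List.slice, PySem.List.clampIdx, List.dropLast_eq_take]
  split_ifs <;> simp_all
  omega

theorem foldl_append_map (l : List String) (acc : List String) :
    l.foldl (fun acc token => acc ++ [token ++ " "]) acc = acc ++ l.map (· ++ " ") := by
  induction l generalizing acc with
  | nil => simp
  | cons t l ih => simp [ih]

/-- What A emits for one line, given the split pieces. -/
def emitA (ts : List (List Char)) : List String :=
  (ts.map String.ofList).dropLast.map (· ++ " ") ++ [(ts.map String.ofList).getLast!]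

theorem getLast!_cons (a : String) (l : List String) (h : l ≠ []) :
    (a :: l).getLast! = l.getLast! := by
  cases l with
  | nil => cases h rfl
  | cons b m => simp [List.getLast!]

theorem emitA_cons (t : List Char) (ts : List (List Char)) (h : ts ≠ []) :
    emitA (t :: ts) = (String.ofList t ++ " ") :: emitA ts := by
  unfold emitA
  have h' : ts.map String.ofList ≠ [] := by simpa using h
  rw [List.map_cons, List.dropLast_cons_of_ne_nil h', getLast!_cons _ _ h']
  simp

theorem scan_line (cs : List Char) : ∀ (b : String) (acc : List String),
    (cs.foldl (fun (p : List String × String) ch => if ch = ' ' then (p.1 ++ [p.2.push ' '], "") else (p.1, p.2.push ch)) (acc, b)).1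
      ++ [(cs.foldl (fun (p : List String × String) ch => if ch = ' ' then (p.1 ++ [p.2.push ' '], "") else (p.1, p.2.push ch)) (acc, b)).2]
    = acc ++ emitA (split1 b.toList cs) := by
  induction cs with
  | nil =>
    intro b acc
    simp [split1, emitA, List.getLast!]
  | cons c cs ih =>
    intro b acc
    by_cases hc : c = ' '
    · subst hc
      rw [List.foldl_cons]
      refine Eq.trans (ih "" (acc ++ [b.push ' '])) ?_
      have h1 : split1 b.toList (' ' :: cs) = b.toList :: split1 [] cs := by simp [split1]
      rw [h1, emitA_cons _ _ (split1_ne_nil _ _)]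
      have h2 : b.push ' ' = String.ofList b.toList ++ " " := by
        rw [String.ofList_toList]
        exact String.push_eq_append ..
      rw [h2]
      simp
    · rw [List.foldl_cons, if_neg hc]
      refine Eq.trans (ih (b.push c) acc) ?_
      have h1 : split1 b.toList (c :: cs) = split1 (b.toList ++ [c]) cs := by simp [split1, hc]
      have h2 : (b.push c).toList = b.toList ++ [c] := by simp
      rw [h1, h2]

theorem line_eq (acc : List String) (tmp : String) :
    (let tokens := (PySem.Chars.splitOn tmp.toList (" ").toList).map String.ofList
      let tmp_result :=
        (PySem.List.slice tokens none (some (-1))).foldl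
          (fun acc token => acc ++ [token ++ " "]) acc
      if tokens.isEmpty then tmp_result else tmp_result ++ [tokens.getLast!])
    = acc ++ emitA (split1 [] tmp.toList) := by
  have h1 : PySem.Chars.splitOn tmp.toList (" ").toList = split1 [] tmp.toList :=
    splitOn_space tmp.toList
  have hne : (split1 [] tmp.toList).map String.ofList ≠ [] := by
    simpa using split1_ne_nil [] tmp.toList
  simp only [h1, slice_dropLast, foldl_append_map]
  rw [if_neg (by simpa [List.isEmpty_iff] using hne)]
  unfold emitA
  simp

theorem make_tokens_spec : Claim_equal_make_tokens := by
  unfold Claim_equal_make_tokens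
  intro lines hD
  clear hD
  unfold Spec_make_tokens make_tokens make_tokens_alt
  simp only [List.foldl_cons, List.foldl_nil]
  induction lines using List.reverseRecOn with
  | nil => rfl
  | append_singleton ls l ih =>
    rw [List.foldl_append, List.foldl_append, List.foldl_cons, List.foldl_nil,
      List.foldl_cons, List.foldl_nil, ih]
    rw [line_eq, scan_line]
    rfl
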